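-- pv_equiv track=rewrite | github.com/Cleveerty/WynnAppTest | DocuScope/stat_calculator.py | _calculate_intelligence_cost_reduction
-- ===== SOURCE A (Python) =====
-- def _calculate_intelligence_cost_reduction(intelligence: int, base_cost: int) -> int:
--     """Calculate mana cost reduction from intelligence (authentic formula)"""
--     if intelligence <= 0:
--         return 0
--
--     # Simplified intelligence formula based on reference materials
--     # Intelligence reduces costs in steps
--     reduction = 0
--     temp_int = intelligence
--
--     while temp_int >= 2 and reduction < base_cost - 1:
--         reduction += 1
--         temp_int -= 2
--
--     return min(reduction, base_cost - 1)  # Never reduce below 1 mana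
-- ===== SOURCE B (Python) =====
-- def _calculate_intelligence_cost_reduction(intelligence: int, base_cost: int) -> int:
--     """Closed-form: each 2 intelligence gives 1 reduction, capped at base_cost - 1."""
--     if intelligence <= 0:
--         return 0
--     return min(intelligence // 2, base_cost - 1)
-- ===== Notes on version B (the rewrite author's own statement) =====
-- stated objective: faster
-- what changed: replaced the step-subtraction while loop by the closed form min(intelligence // 2, base_cost - 1)
import Mathlib
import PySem

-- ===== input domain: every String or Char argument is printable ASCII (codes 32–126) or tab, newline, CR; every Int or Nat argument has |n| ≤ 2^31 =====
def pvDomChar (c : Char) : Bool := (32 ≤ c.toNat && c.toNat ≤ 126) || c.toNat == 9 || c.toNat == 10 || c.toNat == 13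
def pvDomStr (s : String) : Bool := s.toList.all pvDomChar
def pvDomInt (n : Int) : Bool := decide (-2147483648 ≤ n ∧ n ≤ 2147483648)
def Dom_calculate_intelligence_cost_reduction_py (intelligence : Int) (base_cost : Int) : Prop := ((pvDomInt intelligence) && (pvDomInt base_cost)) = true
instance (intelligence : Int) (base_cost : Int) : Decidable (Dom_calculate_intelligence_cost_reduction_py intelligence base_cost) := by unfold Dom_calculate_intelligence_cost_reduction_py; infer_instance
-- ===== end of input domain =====

-- B replaces A's step-subtraction while loop by the closed form min(intelligence // 2, base_cost - 1); O(1) instead of O(intelligence).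


-- ===== PORT A =====
-- the 'while temp_int >= 2 and reduction < base_cost - 1' loop, state (temp_int, reduction)
def pvLoopA (temp_int reduction base_cost : Int) : Int :=
  if h : temp_int ≥ 2 ∧ reduction < base_cost - 1 then
    pvLoopA (temp_int - 2) (reduction + 1) base_cost
  else reduction
termination_by temp_int.toNat
decreasing_by omega

def calculate_intelligence_cost_reduction_py (intelligence : Int) (base_cost : Int) : Int :=
  if intelligence ≤ 0 then 0
  else min (pvLoopA intelligence 0 base_cost) (base_cost - 1)

-- ===== PORT B =====
def calculate_intelligence_cost_reduction_py_alt (intelligence : Int) (base_cost : Int) : Int :=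
  if intelligence ≤ 0 then 0
  else min (PySem.Int.floordiv intelligence 2) (base_cost - 1)

-- ===== PRECONDITION & SPEC =====
def Spec_calculate_intelligence_cost_reduction_py (intelligence : Int) (base_cost : Int) (out : Int) : Prop := out = calculate_intelligence_cost_reduction_py_alt intelligence base_cost
instance (intelligence : Int) (base_cost : Int) (out : Int) : Decidable (Spec_calculate_intelligence_cost_reduction_py intelligence base_cost out) := by unfold Spec_calculate_intelligence_cost_reduction_py; infer_instance

-- ===== CLAIM (what is proved, stated in full; the proofs are below) =====
def Claim_equal_calculate_intelligence_cost_reduction_py : Prop := ∀ (intelligence : Int) (base_cost : Int), Dom_calculate_intelligence_cost_reduction_py intelligence base_cost → Spec_calculate_intelligence_cost_reduction_py intelligence base_cost (calculate_intelligence_cost_reduction_py intelligence base_cost)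

-- ===== LEMMAS AND PROOFS =====
-- loop characterisation: for t ≥ 0 the loop adds min (t / 2) (max (b - 1 - r) 0) to r
theorem pvLoopA_eq (t r b : Int) (ht : 0 ≤ t) :
    pvLoopA t r b = r + min (t / 2) (max (b - 1 - r) 0) := by
  rw [pvLoopA]
  split_ifs with h
  · have := pvLoopA_eq (t - 2) (r + 1) b (by omega)
    rw [this]; omega
  · omega
termination_by t.toNat
decreasing_by omega

-- ===== VERDICT (by name: the statement is the Claim_ definition above) =====
theorem calculate_intelligence_cost_reduction_py_spec : Claim_equal_calculate_intelligence_cost_reduction_py := by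
  intro i b _
  unfold Spec_calculate_intelligence_cost_reduction_py
  unfold calculate_intelligence_cost_reduction_py calculate_intelligence_cost_reduction_py_alt
  split_ifs with h
  · rfl
  · rw [pvLoopA_eq i 0 b (by omega), PySem.Int.floordiv_eq_ediv_of_pos (by omega)]
    omega
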